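-- pv_equiv track=rewrite | github.com/dannyvankooten/advent-of-code | 2021/18-snailfish/main.py | parse_digit
-- ===== SOURCE A (Python) =====
-- def parse_digit(s):
--     start = 0
--     while start < len(s) and s[start].isdigit() == False:
--         start += 1
--
--     if (start == len(s)):
--         return None, None, None
--
--     number = 0
--     end = start
--     while end < len(s) and s[end].isdigit():
--         number = number * 10 + int(s[end])
--         end += 1
--
--     return number, start, end
-- ===== SOURCE B (Python) =====
-- import re
--
-- def parse_digit(s):
--     m = re.search(r'\d+', s)
--     if m is None:
--         return None, None, None
--     return int(m.group()), m.start(), m.end()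
-- ===== Notes on version B (the rewrite author's own statement) =====
-- stated objective: idiomatic
-- what changed: Replaces A's two explicit index-advancing while-loops (skip non-digits, then accumulate digits one by one) with a single re.search for the first maximal digit run, returning its span and int() of the matched text (constant-factor speedup: the scan runs in the C regex engine instead of per-char Python bytecode).
import Mathlib
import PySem

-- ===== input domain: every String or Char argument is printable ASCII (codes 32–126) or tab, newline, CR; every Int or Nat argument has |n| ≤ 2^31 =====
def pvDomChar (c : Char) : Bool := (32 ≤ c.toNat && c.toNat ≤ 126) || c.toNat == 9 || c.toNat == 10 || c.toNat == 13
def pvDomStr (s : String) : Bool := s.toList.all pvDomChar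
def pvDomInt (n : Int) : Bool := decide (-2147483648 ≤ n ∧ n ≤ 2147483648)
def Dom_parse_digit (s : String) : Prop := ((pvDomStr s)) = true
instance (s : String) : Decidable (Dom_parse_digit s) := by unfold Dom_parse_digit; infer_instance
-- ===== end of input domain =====

-- B: locate the first maximal digit run with one search-and-span step (re.search in Python) instead of A's two index-advancing while-loops; same O(n) cost, more idiomatic.


-- ===== PORT A =====
-- first while loop of A: advance start while the char is not a digit
def pvSkipA : List Char → Nat → Nat
  | [], start => start
  | c :: cs, start => if c.isDigit = false then pvSkipA cs (start + 1) else start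

-- second while loop of A: accumulate number and advance end while the char is a digit
-- (int(s[end]) on an ASCII digit char is ported exactly as c.toNat - 48)
def pvAccA : List Char → Int → Nat → Int × Nat
  | [], number, e => (number, e)
  | c :: cs, number, e =>
    if c.isDigit then pvAccA cs (number * 10 + ((c.toNat : Int) - 48)) (e + 1)
    else (number, e)

def parse_digit (s : String) : Option Int × Option Int × Option Int :=
  let cs := s.toList
  let start := pvSkipA cs 0
  if start = cs.length then (none, none, none)
  else
    let r := pvAccA (cs.drop start) 0 start
    (some r.1, some (start : Int), some (r.2 : Int))

-- ===== PORT B =====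
-- re.search(r'\d+', s): position of the first digit, then the maximal digit run from there;
-- int(m.group()) is ported by hand as the exact decimal value of an all-digit string.
def pvIntOfDigits (run : List Char) : Int :=
  run.foldl (fun a c => a * 10 + ((c.toNat : Int) - 48)) 0

def parse_digit_alt (s : String) : Option Int × Option Int × Option Int :=
  let cs := s.toList
  match cs.findIdx? Char.isDigit with
  | none => (none, none, none)
  | some i =>
    let run := (cs.drop i).takeWhile Char.isDigit
    (some (pvIntOfDigits run), some (i : Int), some ((i + run.length : Nat) : Int))

-- ===== PRECONDITION & SPEC =====
def Spec_parse_digit (s : String) (out : Option Int × Option Int × Option Int) : Prop := out = parse_digit_alt s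
instance (s : String) (out : Option Int × Option Int × Option Int) : Decidable (Spec_parse_digit s out) := by unfold Spec_parse_digit; infer_instance

-- ===== CLAIM (what is proved, stated in full; the proofs are below) =====
def Claim_equal_parse_digit : Prop := ∀ (s : String), Dom_parse_digit s → Spec_parse_digit s (parse_digit s)

-- ===== LEMMAS AND PROOFS =====
theorem pvFind_none (cs : List Char) (n : Nat) (h : cs.findIdx? Char.isDigit = none) :
    pvSkipA cs n = n + cs.length := by
  induction cs generalizing n with
  | nil => simp [pvSkipA]
  | cons c cs ih =>
    rw [List.findIdx?_cons] at h
    by_cases hc : c.isDigit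
    · simp [hc] at h
    · simp only [hc, Bool.false_eq_true, if_false, Option.map_eq_none_iff] at h
      simp [pvSkipA, hc, ih _ h]
      omega

theorem pvFind_some (cs : List Char) (i : Nat) (h : cs.findIdx? Char.isDigit = some i) :
    (∀ n, pvSkipA cs n = n + i) ∧ i < cs.length := by
  induction cs generalizing i with
  | nil => simp at h
  | cons c cs ih =>
    rw [List.findIdx?_cons] at h
    by_cases hc : c.isDigit
    · simp [hc] at h
      subst h
      exact ⟨fun n => by simp [pvSkipA, hc], by simp⟩
    · simp [hc] at h
      obtain ⟨j, hj, rfl⟩ := h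
      obtain ⟨h1, h2⟩ := ih j hj
      refine ⟨fun n => ?_, by simp; omega⟩
      simp [pvSkipA, hc, h1]
      omega

theorem pvAccA_eq (l : List Char) (num : Int) (e : Nat) :
    pvAccA l num e =
      ((l.takeWhile Char.isDigit).foldl (fun a c => a * 10 + ((c.toNat : Int) - 48)) num,
       e + (l.takeWhile Char.isDigit).length) := by
  induction l generalizing num e with
  | nil => simp [pvAccA]
  | cons c cs ih =>
    by_cases h : c.isDigit
    · simp [pvAccA, h, ih]; omega
    · simp [pvAccA, h]

-- ===== VERDICT (by name: the statement is the Claim_ definition above) =====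
theorem parse_digit_spec : Claim_equal_parse_digit := by
  intro s _
  show parse_digit s = parse_digit_alt s
  unfold parse_digit parse_digit_alt pvIntOfDigits
  cases hf : s.toList.findIdx? Char.isDigit with
  | none =>
    simp [hf, pvFind_none _ 0 hf]
  | some i =>
    obtain ⟨h1, h2⟩ := pvFind_some _ _ hf
    simp only [h1 0, Nat.zero_add]
    rw [if_neg (Nat.ne_of_lt h2), pvAccA_eq, hf]
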